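-- pv_equiv track=rewrite | github.com/EvanHodges04/COMP-3270 | Project_2/Project_2.py | dfs
-- ===== SOURCE A (Python) =====
-- def dfs(graph, start, target): # Performs DFS from the start node, terminating when the target node is visited.
--     visited = set()
--     stack = []
--     visited_count = 0
--
--     stack.append(start)
--     while stack:
--         current = stack.pop()
--         if current in visited:
--             continue
--         visited.add(current)
--         visited_count += 1
--
--         if current == target:
--             return visited_count
--
--         for neighbor in reversed(graph.get(current, [])):
--             if neighbor not in visited:
--                 stack.append(neighbor)
--     return None
-- ===== SOURCE B (Python) =====
-- def dfs(graph, start, target):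
--     # Recursive DFS sharing a visited set and a counter; returns the count when
--     # the target is reached, None otherwise.
--     visited = set()
--     count = 0
--
--     def visit(node):
--         nonlocal count
--         if node in visited:
--             return None
--         visited.add(node)
--         count += 1
--         if node == target:
--             return count
--         for neighbor in graph.get(node, []):
--             result = visit(neighbor)
--             if result is not None:
--                 return result
--         return None
--
--     return visit(start)
-- ===== Notes on version B (the rewrite author's own statement) =====
-- stated objective: alternative
-- what changed: Replaces A's explicit-stack iteration (push reversed unvisited neighbors, pop, re-check visited) with a recursive visit helper sharing a visited set and counter that recurses into neighbors in forward order and propagates the count upward.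
import Mathlib
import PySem

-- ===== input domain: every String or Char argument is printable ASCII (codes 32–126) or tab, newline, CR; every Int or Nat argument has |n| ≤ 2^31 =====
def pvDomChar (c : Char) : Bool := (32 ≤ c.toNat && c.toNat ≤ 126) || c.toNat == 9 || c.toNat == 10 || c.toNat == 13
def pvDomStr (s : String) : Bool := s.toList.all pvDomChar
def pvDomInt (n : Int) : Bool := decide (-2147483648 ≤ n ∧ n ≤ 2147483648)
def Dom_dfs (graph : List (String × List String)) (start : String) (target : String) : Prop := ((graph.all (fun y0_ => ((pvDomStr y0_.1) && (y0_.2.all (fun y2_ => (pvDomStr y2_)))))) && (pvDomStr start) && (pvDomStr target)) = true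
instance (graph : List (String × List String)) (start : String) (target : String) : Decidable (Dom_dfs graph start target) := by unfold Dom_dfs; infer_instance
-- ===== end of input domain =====

-- B replaces A's explicit stack loop by a recursive `visit` helper threading the
-- visited set and counter (same visit order, same result); objective: alternative decomposition.

-- Finite universe of nodes that can ever be visited: the start node plus every
-- key and neighbour of the graph.  Used only for the termination measures.
def pvUniv (graph : List (String × List String)) (start : String) : Finset String :=
  insert start ((graph.flatMap (fun p => p.1 :: p.2)).toFinset)

theorem pvUniv_start (graph : List (String × List String)) (start : String) :
    start ∈ pvUniv graph start := Finset.mem_insert_self _ _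

theorem pvUniv_graph (graph : List (String × List String)) (start : String) :
    ∀ p ∈ graph, ∀ n ∈ p.2, n ∈ pvUniv graph start := by
  intro p hp n hn
  unfold pvUniv
  apply Finset.mem_insert_of_mem
  simp only [List.mem_toFinset, List.mem_flatMap]
  exact ⟨p, hp, List.mem_cons_of_mem _ hn⟩

-- Python's graph.get(k, []) returns [] or the neighbour list of some entry of graph.
theorem pv_getD_subset (graph : List (String × List String)) (k x : String)
    (hx : x ∈ PySem.Dict.getD (PySem.Dict.mk graph) k []) : ∃ p ∈ graph, x ∈ p.2 := by
  simp only [PySem.Dict.getD, PySem.Dict.get?] at hx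
  rcases hfind : List.find? (fun p => p.1 == k) graph with _ | p
  · rw [hfind] at hx; simp at hx
  · rw [hfind] at hx
    exact ⟨p, List.mem_of_find?_eq_some hfind, by simpa using hx⟩

-- elements reached by the push loop of A come from the pushed list or the old stack
theorem pv_mem_pushFold (p : String → Bool) (l acc : List String) (x : String)
    (hx : x ∈ l.foldl (fun st nb => if p nb then st else nb :: st) acc) :
    x ∈ l ∨ x ∈ acc := by
  induction l generalizing acc with
  | nil => exact Or.inr hx
  | cons a l ih =>
    simp only [List.foldl_cons] at hx
    by_cases hpa : p a
    · rw [if_pos hpa] at hx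
      rcases ih _ hx with h | h
      · exact Or.inl (List.mem_cons_of_mem _ h)
      · exact Or.inr h
    · rw [if_neg hpa] at hx
      rcases ih _ hx with h | h
      · exact Or.inl (List.mem_cons_of_mem _ h)
      · rcases List.mem_cons.mp h with h | h
        · exact Or.inl (h ▸ List.mem_cons_self)
        · exact Or.inr h

theorem pv_toFinset_add (s : PySem.Set String) (a : String) :
    (PySem.Set.add s a).toFinset = insert a s.toFinset := by
  ext x
  simp [PySem.Set.mem_add, or_comm]

theorem pv_card_lt (U : Finset String) (s : PySem.Set String) (a : String)
    (haU : a ∈ U) (has : a ∉ s) :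
    (U \ (PySem.Set.add s a).toFinset).card < (U \ s.toFinset).card := by
  rw [pv_toFinset_add]
  apply Finset.card_lt_card
  constructor
  · exact Finset.sdiff_subset_sdiff (le_refl U) (Finset.subset_insert _ _)
  · intro hsub
    have hmem : a ∈ U \ s.toFinset := Finset.mem_sdiff.mpr ⟨haU, by simpa [List.mem_toFinset] using has⟩
    have := hsub hmem
    simp [Finset.mem_sdiff] at this

theorem pv_card_le (U : Finset String) (s t : PySem.Set String)
    (h : ∀ x ∈ s, x ∈ t) :
    (U \ t.toFinset).card ≤ (U \ s.toFinset).card := by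
  apply Finset.card_le_card
  apply Finset.sdiff_subset_sdiff (le_refl U)
  intro x hx
  simp only [List.mem_toFinset] at hx ⊢
  exact h x hx

-- ===== PORT A =====
-- stack-based loop of A.  U / hU / hs are termination bookkeeping only (Prop arguments).
def dfsLoopA (graph : List (String × List String)) (target : String) (U : Finset String)
    (hU : ∀ p ∈ graph, ∀ n ∈ p.2, n ∈ U)
    (stack : List String) (visited : PySem.Set String) (count : Int)
    (hs : ∀ x ∈ stack, x ∈ U) : Option Int :=
  match stack with
  | [] => none
  | current :: rest =>
    if hc : PySem.Set.contains visited current then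
      dfsLoopA graph target U hU rest visited count
        (fun x hx => hs x (List.mem_cons_of_mem _ hx))
    else
      let visited' := PySem.Set.add visited current
      let count' := count + 1
      if current == target then some count'
      else
        dfsLoopA graph target U hU
          ((PySem.Dict.getD (PySem.Dict.mk graph) current []).reverse.foldl
            (fun st nb => if PySem.Set.contains visited' nb then st else nb :: st) rest)
          visited' count'
          (by
            intro x hx
            rcases pv_mem_pushFold _ _ _ _ hx with h | h
            · rcases pv_getD_subset graph current x (List.mem_reverse.mp h) with ⟨p, hp, hxp⟩
              exact hU p hp x hxp
            · exact hs x (List.mem_cons_of_mem _ h))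
termination_by ((U \ visited.toFinset).card, stack.length)
decreasing_by
  · apply Prod.Lex.right
    simp
  · apply Prod.Lex.left
    exact pv_card_lt U visited current (hs current List.mem_cons_self)
      (fun hm => hc ((PySem.Set.contains_iff visited current).mpr hm))

def dfs (graph : List (String × List String)) (start : String) (target : String) : Option Int :=
  dfsLoopA graph target (pvUniv graph start) (pvUniv_graph graph start)
    [start] PySem.Set.empty 0
    (fun x hx => by have h := List.mem_singleton.mp hx; rw [h]; exact pvUniv_start graph start)

-- ===== PORT B =====
-- recursive `visit` of B, state-passing: (result, visited, count).
-- The subtype certificate (the visited set only grows) is termination bookkeeping.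
mutual
def visitB (graph : List (String × List String)) (target : String) (U : Finset String)
    (hU : ∀ p ∈ graph, ∀ n ∈ p.2, n ∈ U)
    (node : String) (vis : PySem.Set String) (count : Int) (hn : node ∈ U) :
    {out : Option Int × PySem.Set String × Int // ∀ x ∈ vis, x ∈ out.2.1} :=
  if hc : PySem.Set.contains vis node then ⟨(none, vis, count), fun _ hx => hx⟩
  else
    let vis' := PySem.Set.add vis node
    let count' := count + 1
    if node == target then
      ⟨(some count', vis', count'), fun x hx => (PySem.Set.mem_add vis node x).mpr (Or.inl hx)⟩
    else
      let r := foldB graph target U hU (PySem.Dict.getD (PySem.Dict.mk graph) node []) vis' count'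
        (by
          intro x hx
          rcases pv_getD_subset graph node x hx with ⟨p, hp, hxp⟩
          exact hU p hp x hxp)
      ⟨r.1, fun x hx => r.2 x ((PySem.Set.mem_add vis node x).mpr (Or.inl hx))⟩
termination_by ((U \ vis.toFinset).card, 0)
decreasing_by
  apply Prod.Lex.left
  exact pv_card_lt U vis node hn
    (fun hm => hc ((PySem.Set.contains_iff vis node).mpr hm))

def foldB (graph : List (String × List String)) (target : String) (U : Finset String)
    (hU : ∀ p ∈ graph, ∀ n ∈ p.2, n ∈ U)
    (ns : List String) (vis : PySem.Set String) (count : Int) (hns : ∀ x ∈ ns, x ∈ U) :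
    {out : Option Int × PySem.Set String × Int // ∀ x ∈ vis, x ∈ out.2.1} :=
  match ns with
  | [] => ⟨(none, vis, count), fun _ hx => hx⟩
  | n :: rest =>
    let r := visitB graph target U hU n vis count (hns n List.mem_cons_self)
    if r.1.1.isSome then ⟨r.1, r.2⟩
    else
      let r2 := foldB graph target U hU rest r.1.2.1 r.1.2.2
        (fun x hx => hns x (List.mem_cons_of_mem _ hx))
      ⟨r2.1, fun x hx => r2.2 x (r.2 x hx)⟩
termination_by ((U \ vis.toFinset).card, ns.length + 1)
decreasing_by
  · apply Prod.Lex.right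
    omega
  · rcases lt_or_eq_of_le (pv_card_le U vis r.1.2.1 r.2) with h | h
    · exact Prod.Lex.left _ _ h
    · rw [h]
      apply Prod.Lex.right
      simp only [List.length_cons]
      omega
end

def dfs_alt (graph : List (String × List String)) (start : String) (target : String) : Option Int :=
  (visitB graph target (pvUniv graph start) (pvUniv_graph graph start)
    start PySem.Set.empty 0 (pvUniv_start graph start)).1.1

-- ===== PRECONDITION & SPEC =====
def Spec_dfs (graph : List (String × List String)) (start : String) (target : String) (out : Option Int) : Prop := out = dfs_alt graph start target
instance (graph : List (String × List String)) (start : String) (target : String) (out : Option Int) : Decidable (Spec_dfs graph start target out) := by unfold Spec_dfs; infer_instance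

-- ===== CLAIM (what is proved, stated in full; the proofs are below) =====
def Claim_equal_dfs : Prop := ∀ (graph : List (String × List String)) (start : String) (target : String), Dom_dfs graph start target → Spec_dfs graph start target (dfs graph start target)

-- ===== LEMMAS AND PROOFS =====

-- unfold lemmas for the well-founded definitions
theorem dfsLoopA_nil (graph : List (String × List String)) (target : String) (U : Finset String)
    (hU : ∀ p ∈ graph, ∀ n ∈ p.2, n ∈ U) (visited : PySem.Set String) (count : Int)
    (hs : ∀ x ∈ ([] : List String), x ∈ U) :
    dfsLoopA graph target U hU [] visited count hs = none := by
  rw [dfsLoopA.eq_def]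

theorem dfsLoopA_cons (graph : List (String × List String)) (target : String) (U : Finset String)
    (hU : ∀ p ∈ graph, ∀ n ∈ p.2, n ∈ U) (current : String) (rest : List String)
    (visited : PySem.Set String) (count : Int) (hs : ∀ x ∈ current :: rest, x ∈ U) :
    dfsLoopA graph target U hU (current :: rest) visited count hs =
      if PySem.Set.contains visited current then
        dfsLoopA graph target U hU rest visited count
          (fun x hx => hs x (List.mem_cons_of_mem _ hx))
      else if current == target then some (count + 1)
      else
        dfsLoopA graph target U hU
          ((PySem.Dict.getD (PySem.Dict.mk graph) current []).reverse.foldl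
            (fun st nb => if PySem.Set.contains (PySem.Set.add visited current) nb then st else nb :: st) rest)
          (PySem.Set.add visited current) (count + 1)
          (by
            intro x hx
            rcases pv_mem_pushFold _ _ _ _ hx with h | h
            · rcases pv_getD_subset graph current x (List.mem_reverse.mp h) with ⟨p, hp, hxp⟩
              exact hU p hp x hxp
            · exact hs x (List.mem_cons_of_mem _ h)) := by
  rw [dfsLoopA.eq_def]
  by_cases hm : current ∈ visited
  · simp [hm]
  · by_cases ht : current = target
    · subst ht; simp [hm]
    · simp [hm, ht]

theorem dfsLoopA_stack_eq (graph : List (String × List String)) (target : String) (U : Finset String)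
    (hU : ∀ p ∈ graph, ∀ n ∈ p.2, n ∈ U) (s1 s2 : List String) (vis : PySem.Set String) (c : Int)
    (h12 : s1 = s2) (h1 : ∀ x ∈ s1, x ∈ U) (h2 : ∀ x ∈ s2, x ∈ U) :
    dfsLoopA graph target U hU s1 vis c h1 = dfsLoopA graph target U hU s2 vis c h2 := by
  subst h12; rfl

theorem visitB_eq (graph : List (String × List String)) (target : String) (U : Finset String)
    (hU : ∀ p ∈ graph, ∀ n ∈ p.2, n ∈ U) (node : String) (vis : PySem.Set String) (count : Int)
    (hn : node ∈ U) :
    (visitB graph target U hU node vis count hn).1 =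
      if PySem.Set.contains vis node then (none, vis, count)
      else if node == target then (some (count + 1), PySem.Set.add vis node, count + 1)
      else
        (foldB graph target U hU (PySem.Dict.getD (PySem.Dict.mk graph) node [])
          (PySem.Set.add vis node) (count + 1)
          (by
            intro x hx
            rcases pv_getD_subset graph node x hx with ⟨p, hp, hxp⟩
            exact hU p hp x hxp)).1 := by
  rw [visitB.eq_def]
  by_cases hm : node ∈ vis
  · simp [hm]
  · by_cases ht : node = target
    · subst ht; simp [hm]
    · simp [hm, ht]

theorem foldB_nil (graph : List (String × List String)) (target : String) (U : Finset String)
    (hU : ∀ p ∈ graph, ∀ n ∈ p.2, n ∈ U) (vis : PySem.Set String) (count : Int)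
    (hns : ∀ x ∈ ([] : List String), x ∈ U) :
    (foldB graph target U hU [] vis count hns).1 = (none, vis, count) := by
  rw [foldB.eq_def]

theorem foldB_cons (graph : List (String × List String)) (target : String) (U : Finset String)
    (hU : ∀ p ∈ graph, ∀ n ∈ p.2, n ∈ U) (n : String) (rest : List String)
    (vis : PySem.Set String) (count : Int) (hns : ∀ x ∈ n :: rest, x ∈ U) :
    (foldB graph target U hU (n :: rest) vis count hns).1 =
      (if ((visitB graph target U hU n vis count (hns n List.mem_cons_self)).1).1.isSome then
        (visitB graph target U hU n vis count (hns n List.mem_cons_self)).1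
      else
        (foldB graph target U hU rest
          ((visitB graph target U hU n vis count (hns n List.mem_cons_self)).1).2.1
          ((visitB graph target U hU n vis count (hns n List.mem_cons_self)).1).2.2
          (fun x hx => hns x (List.mem_cons_of_mem _ hx))).1) := by
  rw [foldB.eq_def]
  dsimp only []
  split <;> rfl

theorem foldB_list_eq (graph : List (String × List String)) (target : String) (U : Finset String)
    (hU : ∀ p ∈ graph, ∀ n ∈ p.2, n ∈ U) (l1 l2 : List String) (h12 : l1 = l2)
    (vis : PySem.Set String) (c : Int) (h1 : ∀ x ∈ l1, x ∈ U) (h2 : ∀ x ∈ l2, x ∈ U) :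
    (foldB graph target U hU l1 vis c h1).1 = (foldB graph target U hU l2 vis c h2).1 := by
  subst h12; rfl

-- A's push loop over the reversed neighbour list = the unvisited neighbours, in order, on top.
theorem pv_pushFold_eq (p : String → Bool) (l acc : List String) :
    l.foldl (fun st x => if p x then st else x :: st) acc
      = (l.filter (fun x => !p x)).reverse ++ acc := by
  induction l generalizing acc with
  | nil => rfl
  | cons a l ih =>
    simp only [List.foldl_cons, List.filter_cons]
    by_cases hpa : p a
    · simp [hpa, ih]
    · rw [if_neg hpa, ih (a :: acc)]
      simp [hpa]

-- skipping already-visited neighbours at push time (A) is a no-op for B's fold,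
-- because visitB returns unchanged state on a visited node
theorem pv_skip_filter (graph : List (String × List String)) (target : String) (U : Finset String)
    (hU : ∀ p ∈ graph, ∀ n ∈ p.2, n ∈ U)
    (vis0 : PySem.Set String) (nbrs : List String) (vis : PySem.Set String) (c : Int)
    (hsub : ∀ x ∈ vis0, x ∈ vis)
    (h1 : ∀ x ∈ nbrs.filter (fun nb => !PySem.Set.contains vis0 nb), x ∈ U)
    (h2 : ∀ x ∈ nbrs, x ∈ U) :
    (foldB graph target U hU (nbrs.filter (fun nb => !PySem.Set.contains vis0 nb)) vis c h1).1
      = (foldB graph target U hU nbrs vis c h2).1 := by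
  induction nbrs generalizing vis c with
  | nil => rfl
  | cons n rest ih =>
    by_cases hn : PySem.Set.contains vis0 n
    · have hmem : n ∈ vis := hsub n ((PySem.Set.contains_iff vis0 n).mp hn)
      have hcont : PySem.Set.contains vis n = true := (PySem.Set.contains_iff vis n).mpr hmem
      have hfc : (n :: rest).filter (fun nb => !PySem.Set.contains vis0 nb)
          = rest.filter (fun nb => !PySem.Set.contains vis0 nb) := by
        simp [(PySem.Set.contains_iff vis0 n).mp hn]
      calc (foldB graph target U hU ((n :: rest).filter (fun nb => !PySem.Set.contains vis0 nb)) vis c h1).1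
          = (foldB graph target U hU (rest.filter (fun nb => !PySem.Set.contains vis0 nb)) vis c
              (hfc ▸ h1)).1 := foldB_list_eq graph target U hU _ _ hfc vis c h1 _
        _ = (foldB graph target U hU rest vis c
              (fun x hx => h2 x (List.mem_cons_of_mem _ hx))).1 := ih vis c hsub _ _
        _ = (foldB graph target U hU (n :: rest) vis c h2).1 := by
              rw [foldB_cons, visitB_eq, hcont]
              simp
    · have hm0 : n ∉ vis0 := fun h => hn ((PySem.Set.contains_iff vis0 n).mpr h)
      have hfc : (n :: rest).filter (fun nb => !PySem.Set.contains vis0 nb)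
          = n :: rest.filter (fun nb => !PySem.Set.contains vis0 nb) := by
        simp [hm0]
      calc (foldB graph target U hU ((n :: rest).filter (fun nb => !PySem.Set.contains vis0 nb)) vis c h1).1
          = (foldB graph target U hU (n :: rest.filter (fun nb => !PySem.Set.contains vis0 nb)) vis c
              (hfc ▸ h1)).1 := foldB_list_eq graph target U hU _ _ hfc vis c h1 _
        _ = (foldB graph target U hU (n :: rest) vis c h2).1 := by
              rw [foldB_cons, foldB_cons]
              have hv : visitB graph target U hU n vis c ((hfc ▸ h1) n List.mem_cons_self)
                  = visitB graph target U hU n vis c (h2 n List.mem_cons_self) := rfl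
              rw [hv]
              by_cases hsome : ((visitB graph target U hU n vis c (h2 n List.mem_cons_self)).1).1.isSome
              · simp [hsome]
              · simp only [hsome, Bool.false_eq_true, if_false]
                exact ih _ _
                  (fun x hx => (visitB graph target U hU n vis c (h2 n List.mem_cons_self)).2 x (hsub x hx)) _ _

-- main invariant: running A's loop on ns ++ rest = running B's fold on ns, then
-- (if no result) A's loop on rest with the updated state.
theorem pv_main (graph : List (String × List String)) (target : String) (U : Finset String)
    (hU : ∀ p ∈ graph, ∀ n ∈ p.2, n ∈ U)
    (ns rest : List String) (vis : PySem.Set String) (c : Int)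
    (hns : ∀ x ∈ ns, x ∈ U) (hrest : ∀ x ∈ rest, x ∈ U) :
    dfsLoopA graph target U hU (ns ++ rest) vis c
        (fun x hx => (List.mem_append.mp hx).elim (hns x) (hrest x))
      = (match (foldB graph target U hU ns vis c hns).1 with
         | (some res, _, _) => some res
         | (none, v, c') => dfsLoopA graph target U hU rest v c' hrest) := by
  match ns with
  | [] =>
    rw [foldB_nil]
    exact dfsLoopA_stack_eq graph target U hU ([] ++ rest) rest vis c (List.nil_append rest) _ hrest
  | n :: ns' =>
    have hnU : n ∈ U := hns n List.mem_cons_self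
    have hns' : ∀ x ∈ ns', x ∈ U := fun x hx => hns x (List.mem_cons_of_mem _ hx)
    have hcomb : ∀ x ∈ ns' ++ rest, x ∈ U :=
      fun x hx => (List.mem_append.mp hx).elim (hns' x) (hrest x)
    have hcons : ∀ x ∈ n :: (ns' ++ rest), x ∈ U := by
      intro x hx
      rcases List.mem_cons.mp hx with h | h
      · rw [h]; exact hnU
      · exact hcomb x h
    rw [dfsLoopA_stack_eq graph target U hU ((n :: ns') ++ rest) (n :: (ns' ++ rest)) vis c
      rfl _ hcons]
    rw [dfsLoopA_cons, foldB_cons, visitB_eq]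
    by_cases hm : n ∈ vis
    · have hcont : PySem.Set.contains vis n = true := (PySem.Set.contains_iff vis n).mpr hm
      rw [hcont]
      simp only [if_true, Option.isSome_none, Bool.false_eq_true, if_false]
      exact pv_main graph target U hU ns' rest vis c hns' hrest
    · have hcont : PySem.Set.contains vis n = false := by
        rcases h : PySem.Set.contains vis n
        · rfl
        · exact absurd ((PySem.Set.contains_iff vis n).mp h) hm
      rw [hcont]
      simp only [Bool.false_eq_true, if_false]
      by_cases ht : n = target
      · simp [ht]
      · have htb : (n == target) = false := by simp [ht]
        rw [htb]
        simp only [Bool.false_eq_true, if_false]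
        have hnbrs : ∀ x ∈ PySem.Dict.getD (PySem.Dict.mk graph) n [], x ∈ U := by
          intro x hx
          rcases pv_getD_subset graph n x hx with ⟨p, hp, hxp⟩
          exact hU p hp x hxp
        have hfilter : ∀ x ∈ (PySem.Dict.getD (PySem.Dict.mk graph) n []).filter
            (fun nb => !PySem.Set.contains (PySem.Set.add vis n) nb), x ∈ U :=
          fun x hx => hnbrs x (List.mem_of_mem_filter hx)
        have hpush : (PySem.Dict.getD (PySem.Dict.mk graph) n []).reverse.foldl
            (fun st nb => if PySem.Set.contains (PySem.Set.add vis n) nb then st else nb :: st)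
            (ns' ++ rest)
            = (PySem.Dict.getD (PySem.Dict.mk graph) n []).filter
                (fun nb => !PySem.Set.contains (PySem.Set.add vis n) nb) ++ (ns' ++ rest) := by
          rw [pv_pushFold_eq, List.filter_reverse, List.reverse_reverse]
        rw [dfsLoopA_stack_eq graph target U hU _ _ (PySem.Set.add vis n) (c + 1) hpush _
          (fun x hx => (List.mem_append.mp hx).elim (hfilter x) (hcomb x))]
        rw [pv_main graph target U hU
          ((PySem.Dict.getD (PySem.Dict.mk graph) n []).filter
            (fun nb => !PySem.Set.contains (PySem.Set.add vis n) nb))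
          (ns' ++ rest) (PySem.Set.add vis n) (c + 1) hfilter hcomb]
        rw [pv_skip_filter graph target U hU (PySem.Set.add vis n) _ (PySem.Set.add vis n) (c + 1)
          (fun x hx => hx) hfilter hnbrs]
        rcases hout : (foldB graph target U hU (PySem.Dict.getD (PySem.Dict.mk graph) n [])
            (PySem.Set.add vis n) (c + 1) hnbrs).1 with ⟨o, v, c''⟩
        rcases o with _ | res
        · have hv' : ∀ x ∈ PySem.Set.add vis n, x ∈ v := by
            intro x hx
            have h := (foldB graph target U hU (PySem.Dict.getD (PySem.Dict.mk graph) n [])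
              (PySem.Set.add vis n) (c + 1) hnbrs).2 x hx
            rw [hout] at h
            exact h
          simp only [Option.isSome_none, Bool.false_eq_true, if_false]
          rw [pv_main graph target U hU ns' rest v c'' hns' hrest]
          simp
        · simp
termination_by ((U \ vis.toFinset).card, ns.length)
decreasing_by
  · apply Prod.Lex.right
    simp only [List.length_cons]
    omega
  · apply Prod.Lex.left
    exact pv_card_lt U vis n hnU hm
  · apply Prod.Lex.left
    exact lt_of_le_of_lt (pv_card_le U (PySem.Set.add vis n) v hv') (pv_card_lt U vis n hnU hm)

-- ===== VERDICT (by name: the statement is the Claim_ definition above) =====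
theorem dfs_spec : Claim_equal_dfs := by
  intro graph start target _
  unfold Spec_dfs dfs dfs_alt
  have hstart : ∀ x ∈ [start], x ∈ pvUniv graph start := fun x hx => by
    have h := List.mem_singleton.mp hx
    rw [h]
    exact pvUniv_start graph start
  have h := pv_main graph target (pvUniv graph start) (pvUniv_graph graph start)
    [start] [] PySem.Set.empty 0 hstart (fun x hx => absurd hx List.not_mem_nil)
  refine Eq.trans (Eq.trans ?_ h) ?_
  · exact dfsLoopA_stack_eq graph target (pvUniv graph start) (pvUniv_graph graph start)
      [start] ([start] ++ []) PySem.Set.empty 0 (by simp) _ _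
  · rw [foldB_cons]
    have hv : visitB graph target (pvUniv graph start) (pvUniv_graph graph start) start
        PySem.Set.empty 0 (hstart start List.mem_cons_self)
        = visitB graph target (pvUniv graph start) (pvUniv_graph graph start) start
          PySem.Set.empty 0 (pvUniv_start graph start) := rfl
    rw [hv]
    rcases hout : (visitB graph target (pvUniv graph start) (pvUniv_graph graph start) start
        PySem.Set.empty 0 (pvUniv_start graph start)).1 with ⟨o, v, c⟩
    rcases o with _ | res
    · simp only [Option.isSome_none, Bool.false_eq_true, if_false]
      rw [foldB_nil]
      simp only []
      rw [dfsLoopA_nil]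
    · simp
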